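-- pv_equiv track=rewrite | github.com/fazli1702/H2-Computing | LT 6 Iteration/Tutorial 6.py | alt_fire_iterate
-- ===== SOURCE A (Python) =====
-- def alt_fire_iterate(num_enemy_ships):
--     beam = ''
--     for i in range(1, num_enemy_ships + 1):
--         if i % 2 == 0:
--             beam = beam + '*--'
--         else:
--             beam = beam + '*-'
--     return beam
-- ===== SOURCE B (Python) =====
-- def alt_fire_iterate(num_enemy_ships):
--     n = max(num_enemy_ships, 0)
--     return '*-*--' * (n // 2) + '*-' * (n % 2)
-- ===== Notes on version B (the rewrite author's own statement) =====
-- stated objective: simpler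
-- what changed: Replaces the per-ship loop with a closed form: the output is periodic with period '*-*--', so B returns '*-*--' * (n // 2) plus a trailing '*-' when n is odd (n clamped to 0).
import Mathlib
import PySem

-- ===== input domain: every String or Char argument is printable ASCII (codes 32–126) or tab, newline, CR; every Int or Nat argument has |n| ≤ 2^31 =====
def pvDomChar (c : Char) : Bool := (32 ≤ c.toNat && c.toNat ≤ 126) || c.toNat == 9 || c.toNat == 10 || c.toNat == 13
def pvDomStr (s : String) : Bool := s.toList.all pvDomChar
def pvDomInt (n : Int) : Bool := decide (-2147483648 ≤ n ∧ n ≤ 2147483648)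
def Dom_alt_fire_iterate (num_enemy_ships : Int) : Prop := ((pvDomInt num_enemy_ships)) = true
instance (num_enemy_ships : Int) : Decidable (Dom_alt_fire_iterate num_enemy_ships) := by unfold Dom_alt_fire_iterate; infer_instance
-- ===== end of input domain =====

-- ===== PORT A =====
-- Literal port of A: fold over range(1, n+1), appending '*--' for even i and '*-' for odd i.
-- The string is represented as List Char during the fold (exact for this ASCII content),
-- packed with String.mk at the end.
def alt_fire_iterate (num_enemy_ships : Int) : String :=
  String.mk ((PySem.List.pyRange 1 (num_enemy_ships + 1) 1).foldl
    (fun beam i =>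
      if PySem.Int.mod i 2 = 0 then beam ++ ['*', '-', '-'] else beam ++ ['*', '-'])
    [])

-- ===== PORT B =====
-- Port of B: clamp n to 0, then '*-*--' repeated n//2 times plus '*-' if n is odd.
def alt_fire_iterate_alt (num_enemy_ships : Int) : String :=
  String.mk
    ((List.replicate (PySem.Int.floordiv (max num_enemy_ships 0) 2).toNat
        ['*', '-', '*', '-', '-']).flatten
      ++ (if PySem.Int.mod (max num_enemy_ships 0) 2 = 1 then ['*', '-'] else []))

-- ===== PRECONDITION & SPEC =====
def Spec_alt_fire_iterate (num_enemy_ships : Int) (out : String) : Prop := out = alt_fire_iterate_alt num_enemy_ships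
instance (num_enemy_ships : Int) (out : String) : Decidable (Spec_alt_fire_iterate num_enemy_ships out) := by unfold Spec_alt_fire_iterate; infer_instance

-- ===== CLAIM (what is proved, stated in full; the proofs are below) =====
def Claim_equal_alt_fire_iterate : Prop := ∀ (num_enemy_ships : Int), Dom_alt_fire_iterate num_enemy_ships → Spec_alt_fire_iterate num_enemy_ships (alt_fire_iterate num_enemy_ships)

-- ===== LEMMAS AND PROOFS =====

-- ===== VERDICT (by name: the statement is the Claim_ definition above) =====
-- A's fold over range(1, m+1) in closed form.
theorem altFire_core (m : Nat) :
    List.foldl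
      (fun beam i =>
        if PySem.Int.mod i 2 = 0 then beam ++ ['*', '-', '-'] else beam ++ ['*', '-'])
      [] ((List.range m).map (fun k : Nat => (1 : Int) + (k : Int)))
    = (List.replicate (m / 2) ['*', '-', '*', '-', '-']).flatten
      ++ (if m % 2 = 1 then ['*', '-'] else []) := by
  induction m with
  | zero => simp
  | succ m ih =>
    rw [List.range_succ, List.map_append, List.foldl_append, ih]
    simp only [List.map_cons, List.map_nil, List.foldl_cons, List.foldl_nil]
    have hcast : PySem.Int.mod (1 + (m : Int)) 2 = (((1 + m) % 2 : Nat) : Int) := by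
      exact_mod_cast PySem.Int.mod_natCast (1 + m) 2
    rcases Nat.even_or_odd m with he | ho
    · have h2 : m % 2 = 0 := Nat.even_iff.mp he
      have hmod : PySem.Int.mod (1 + (m : Int)) 2 = 1 := by rw [hcast]; omega
      rw [hmod]
      have hdiv : (m + 1) / 2 = m / 2 := by omega
      have hm1 : (m + 1) % 2 = 1 := by omega
      simp [h2, hdiv, hm1]
    · have h2 : m % 2 = 1 := Nat.odd_iff.mp ho
      have hmod : PySem.Int.mod (1 + (m : Int)) 2 = 0 := by rw [hcast]; omega
      rw [hmod]
      have hdiv : (m + 1) / 2 = m / 2 + 1 := by omega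
      have hm1 : (m + 1) % 2 = 0 := by omega
      simp [h2, hdiv, hm1, List.replicate_succ', List.append_assoc]

theorem alt_fire_iterate_spec : Claim_equal_alt_fire_iterate := by
  intro n _
  unfold Spec_alt_fire_iterate alt_fire_iterate alt_fire_iterate_alt
  by_cases hn : 0 ≤ n
  · obtain ⟨m, rfl⟩ := Int.eq_ofNat_of_zero_le hn
    rw [PySem.List.pyRange_one]
    have hr : ((m : Int) + 1 - 1).toNat = m := by omega
    have hmax : max (m : Int) 0 = (m : Int) := by omega
    rw [hr, hmax, altFire_core]
    have hd : PySem.Int.floordiv (m : Int) 2 = ((m / 2 : Nat) : Int) := by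
      exact_mod_cast PySem.Int.floordiv_natCast m 2
    have hm : PySem.Int.mod (m : Int) 2 = ((m % 2 : Nat) : Int) := by
      exact_mod_cast PySem.Int.mod_natCast m 2
    rw [hd, hm, Int.toNat_natCast]
    congr 1
    by_cases h1 : m % 2 = 1 <;> simp [h1] <;> omega
  · have h0 : ((n : Int) + 1 - 1).toNat = 0 := by omega
    rw [PySem.List.pyRange_one, h0]
    have hmax : max n 0 = 0 := by omega
    rw [hmax]
    simp [PySem.Int.floordiv, PySem.Int.mod]
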